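-- pv_equiv track=rewrite | github.com/Gwenn01/PYTHON-CODING-PART2 | TruncateSentence.py | truncateSentence
-- ===== SOURCE A (Python) =====
-- def truncateSentence(s, k):
--     result = ""
--     for str in s:
--         if str == ' ':
--             k -= 1
--         if k == 0:
--             break
--         result += str
--     return result
-- ===== SOURCE B (Python) =====
-- def truncateSentence(s, k):
--     return ' '.join(s.split(' ')[:k])
-- ===== Notes on version B (the rewrite author's own statement) =====
-- stated objective: idiomatic
-- what changed: Replaces the per-character Python loop with a space counter and string += by tokenize/slice/rejoin (split on ' ', take the first k words, join back), doing the work in C-level str.split/str.join.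
-- outside the precondition, e.g. on truncateSentence('a b', -1): A returns 'a b', B returns 'a'; on truncateSentence(' a', 0): A returns ' a', B returns ''
import Mathlib
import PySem

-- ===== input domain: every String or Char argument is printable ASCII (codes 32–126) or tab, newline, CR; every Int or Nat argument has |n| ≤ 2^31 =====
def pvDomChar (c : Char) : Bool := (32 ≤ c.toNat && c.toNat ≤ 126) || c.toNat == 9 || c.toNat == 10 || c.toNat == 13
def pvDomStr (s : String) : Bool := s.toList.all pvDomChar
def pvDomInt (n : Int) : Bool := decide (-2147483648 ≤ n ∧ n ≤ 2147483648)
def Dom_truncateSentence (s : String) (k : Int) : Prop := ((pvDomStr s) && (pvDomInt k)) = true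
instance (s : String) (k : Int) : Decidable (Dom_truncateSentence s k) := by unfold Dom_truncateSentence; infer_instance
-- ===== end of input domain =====

-- B rewrites A's character scan (space counter + early break) as tokenize / slice / rejoin: split on ' ', take the first k words, join back.

-- ===== PORT A =====
-- A's loop: for each char, decrement k on ' ', break when k hits 0, else append the char.
def truncGo : List Char → Int → List Char
  | [], _ => []
  | c :: rest, k =>
    let k' := if c = ' ' then k - 1 else k
    if k' = 0 then [] else c :: truncGo rest k'

def truncateSentence (s : String) (k : Int) : String :=
  String.ofList (truncGo s.toList k)

-- ===== PORT B =====
def truncateSentence_alt (s : String) (k : Int) : String :=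
  PySem.Str.join " " (PySem.List.slice ((PySem.Str.split? s " ").getD []) none (some k))

-- ===== PRECONDITION & SPEC =====
-- Pre_ restricts to the natural domain of 'truncate to the first k words' (a positive word
-- count): for k ≤ 0 A's counter never (or immediately) reaches 0 and its whole-string /
-- empty result is an accident of the implementation, while B's [:k] slice semantics are
-- Python's; neither value is specified, so those inputs are excluded.
def Pre_truncateSentence (s : String) (k : Int) : Prop := 1 ≤ k
instance (s : String) (k : Int) : Decidable (Pre_truncateSentence s k) := by unfold Pre_truncateSentence; infer_instance
def pvWitness_truncateSentence : String × Int := ("hello world and more", 2)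
def Spec_truncateSentence (s : String) (k : Int) (out : String) : Prop := out = truncateSentence_alt s k
instance (s : String) (k : Int) (out : String) : Decidable (Spec_truncateSentence s k out) := by unfold Spec_truncateSentence; infer_instance

-- ===== CLAIM (what is proved, stated in full; the proofs are below) =====
def Claim_equal_truncateSentence : Prop := ∀ (s : String) (k : Int), Dom_truncateSentence s k → Pre_truncateSentence s k → Spec_truncateSentence s k (truncateSentence s k)

-- ===== LEMMAS AND PROOFS =====

-- Simple structural split on ' ' (reference model for PySem.Chars.splitOn with sep [' ']).
def spaceSplit : List Char → List (List Char)
  | [] => [[]]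
  | c :: rest =>
    if c = ' ' then [] :: spaceSplit rest
    else
      match spaceSplit rest with
      | [] => [[c]]
      | h :: t => (c :: h) :: t

theorem spaceSplit_ne_nil (l : List Char) : spaceSplit l ≠ [] := by
  cases l with
  | nil => simp [spaceSplit]
  | cons c rest =>
    simp only [spaceSplit]
    split
    · simp
    · split <;> simp

-- Prepend a prefix onto the first token.
def consHead (p : List Char) : List (List Char) → List (List Char)
  | [] => [p]
  | h :: t => (p ++ h) :: t

theorem consHead_nil (xs : List (List Char)) (h : xs ≠ []) : consHead [] xs = xs := by
  cases xs with
  | nil => exact absurd rfl h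
  | cons a t => simp [consHead]

theorem consHead_consHead (p q : List Char) (xs : List (List Char)) :
    consHead p (consHead q xs) = consHead (p ++ q) xs := by
  cases xs <;> simp [consHead]

-- Characterisation of PySem's fuelled splitter for sep = [' '].
theorem splitOn_go_spec : ∀ (fuel : Nat) (l cur : List Char) (acc : List (List Char)),
    l.length < fuel →
    PySem.Chars.splitOn.go [' '] fuel l cur acc =
      acc.reverse ++ consHead cur.reverse (spaceSplit l) := by
  intro fuel
  induction fuel with
  | zero => intro l cur acc h; omega
  | succ f ih =>
    intro l cur acc h
    cases l with
    | nil =>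
      rw [PySem.Chars.splitOn.go.eq_def]
      simp [spaceSplit, consHead]
    | cons c rest =>
      rw [PySem.Chars.splitOn.go.eq_def]
      simp only []
      by_cases hc : c = ' '
      · subst hc
        have hpre : List.isPrefixOf [' '] (' ' :: rest) = true := by
          simp [List.isPrefixOf]
        simp only [hpre, if_true, List.length_cons, List.length_nil, List.drop_succ_cons,
          List.drop_zero]
        rw [ih rest [] (cur.reverse :: acc) (by simp at h; omega)]
        cases hs : spaceSplit rest with
        | nil => exact absurd hs (spaceSplit_ne_nil rest)
        | cons a u => simp [spaceSplit, hs, consHead]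
      · have hpre : List.isPrefixOf [' '] (c :: rest) = false := by
          simp [List.isPrefixOf]
          intro hh; exact absurd hh.symm hc
        simp only [hpre, Bool.false_eq_true, if_false]
        rw [ih rest (c :: cur) acc (by simp at h; omega)]
        have : spaceSplit (c :: rest) = consHead [c] (spaceSplit rest) := by
          simp only [spaceSplit, if_neg hc]
          cases hs : spaceSplit rest <;> simp [consHead]
        rw [this, List.reverse_cons, ← consHead_consHead]

theorem splitOn_space (l : List Char) :
    PySem.Chars.splitOn l [' '] = spaceSplit l := by
  unfold PySem.Chars.splitOn
  rw [splitOn_go_spec (l.length + 1) l [] [] (by omega)]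
  simp [consHead_nil _ (spaceSplit_ne_nil l)]

-- Join with a single space, structurally.
def spaceJoin : List (List Char) → List Char
  | [] => []
  | [x] => x
  | x :: xs => x ++ ' ' :: spaceJoin xs

theorem spaceJoin_eq_join (xs : List (List Char)) :
    PySem.Chars.join [' '] xs = spaceJoin xs := by
  induction xs with
  | nil => simp [PySem.Chars.join, spaceJoin, List.intercalate]
  | cons a t ih =>
    cases t with
    | nil => simp [PySem.Chars.join, spaceJoin, List.intercalate]
    | cons b u =>
      simp only [spaceJoin]
      rw [← ih]
      simp [PySem.Chars.join, List.intercalate, List.intersperse]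

-- The heart of the equivalence: A's scan equals 'take k words, join with spaces' for k ≥ 1.
theorem truncGo_eq (l : List Char) : ∀ (k : Int), 1 ≤ k →
    truncGo l k = spaceJoin ((spaceSplit l).take k.toNat) := by
  induction l with
  | nil =>
    intro k hk
    have : ∃ n : Nat, k.toNat = n + 1 := ⟨k.toNat - 1, by omega⟩
    obtain ⟨n, hn⟩ := this
    simp [truncGo, spaceSplit, hn, spaceJoin]
  | cons c rest ih =>
    intro k hk
    by_cases hc : c = ' '
    · subst hc
      simp only [truncGo, if_true]
      by_cases h1 : k = 1
      · subst h1
        simp [spaceSplit, spaceJoin]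
      · have hk2 : 1 ≤ k - 1 := by omega
        rw [if_neg (show ¬(k - 1 = 0) by omega)]
        rw [ih (k - 1) hk2]
        have hkn : k.toNat = (k - 1).toNat + 1 := by omega
        simp only [spaceSplit, if_true, hkn, List.take_succ_cons]
        cases ht : (spaceSplit rest).take (k - 1).toNat with
        | nil =>
          rw [List.take_eq_nil_iff] at ht
          rcases ht with h0 | h0
          · omega
          · exact absurd h0 (spaceSplit_ne_nil rest)
        | cons a u => simp [spaceJoin]
    · simp only [truncGo, if_neg hc]
      rw [if_neg (show ¬(k = 0) by omega)]
      rw [ih k hk]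
      have hsp : spaceSplit (c :: rest) = consHead [c] (spaceSplit rest) := by
        simp only [spaceSplit, if_neg hc]
        cases hs : spaceSplit rest <;> simp [consHead]
      rw [hsp]
      have : ∃ n : Nat, k.toNat = n + 1 := ⟨k.toNat - 1, by omega⟩
      obtain ⟨n, hn⟩ := this
      cases hs : spaceSplit rest with
      | nil => exact absurd hs (spaceSplit_ne_nil rest)
      | cons a u =>
        simp only [consHead, hn, List.take_succ_cons]
        cases hu : u.take n with
        | nil => simp [spaceJoin]
        | cons b v => simp [spaceJoin]

-- ===== VERDICT (by name: the statement is the Claim_ definition above) =====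
theorem truncateSentence_spec : Claim_equal_truncateSentence := by
  intro s k _ hk
  unfold Spec_truncateSentence truncateSentence truncateSentence_alt
  have hsplit : (PySem.Str.split? s " ").getD [] =
      List.map String.ofList (spaceSplit s.toList) := by
    rw [PySem.Str.split?.eq_1]
    rw [PySem.Chars.split?.eq_1]
    simp [splitOn_space]
  have hk1 : (1:Int) ≤ k := hk
  rw [hsplit, PySem.List.slice_to _ (by omega : (0:Int) ≤ k)]
  apply String.ext
  rw [PySem.Str.toList_join]
  simp only [List.map_take, List.map_map]
  have hmm : ∀ xs : List (List Char), List.map (String.toList ∘ String.ofList) xs = xs := by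
    intro xs
    induction xs with
    | nil => rfl
    | cons a t ih2 => simp [ih2, String.toList_ofList]
  rw [hmm]
  have : (" ".toList : List Char) = [' '] := rfl
  rw [this, spaceJoin_eq_join, String.toList_ofList, truncGo_eq s.toList k hk1]
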